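-- pv_equiv track=rewrite | github.com/waterricecake/TIL | algo/part3/Q18_2.py | solution
-- ===== SOURCE A (Python) =====
-- def check_bal(p):
--     right_side = 0
--     left_side = 0
--     for i in p:
--         if i == ")":
--             right_side += 1
--         elif i == "(":
--             left_side += 1
--     if right_side != left_side:
--         return False
--     return True
--
-- def check_per(p):
--     count = 0
--     for i in p:
--         if i =="(":
--             count += 1
--         else:
--             if count == 0:
--                 return False
--             count -= 1
--     return True
--
-- def solution(p):
--     answer =""
--     u = ""
--     if check_per(p):
--         return p
--     for i in range(len(p)+1):
--         if check_bal(p[:i]) and len(p[:i]) != 0 and check_bal(p[i:]):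
--             u = p[:i]
--             w = p[i:]
--             break
--     if check_per(u) == True:
--         answer += u
--         answer += solution(w)
--     elif check_per(u) == False:
--         s = "("+w+")"
--         u = list(u[1:-1])
--         for i in range(len(u)):
--             if u[i] == "(":
--                 u[i] = ")"
--             else:
--                 u[i] = "("
--             s += u[i]
--         answer += solution(s)
--     return answer
-- ===== SOURCE B (Python) =====
-- def solution(p):
--     # One pass per level: running counters find the split and the correctness
--     # checks, instead of re-counting every slice.
--     tl = p.count("(")
--     tr = p.count(")")
--     bal = 0        # running balance, +1 for '(' and -1 for any other char
--     dip = False    # balance has gone negative somewhere so far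
--     pl = pr = 0    # running parenthesis counts
--     split = 0      # first index whose prefix and suffix are both paren-balanced
--     udip = False   # dip flag frozen at the split point
--     for i, c in enumerate(p):
--         bal += 1 if c == "(" else -1
--         if bal < 0:
--             dip = True
--         if c == "(":
--             pl += 1
--         elif c == ")":
--             pr += 1
--         if split == 0 and pl == pr and tl - pl == tr - pr:
--             split = i + 1
--             udip = dip
--     if not dip:
--         return p
--     u, w = p[:split], p[split:]
--     if not udip:
--         return u + solution(w)
--     return solution("(" + w + ")" + "".join(")" if c == "(" else "(" for c in u[1:-1]))
-- ===== Notes on version B (the rewrite author's own statement) =====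
-- stated objective: faster
-- what changed: B finds the split point and both correctness tests in ONE running-counter pass per recursion level (running balance with a dip flag plus running paren counts against the totals), replacing A's scan that re-counts every slice p[:i] and p[i:] with check_bal and re-runs check_per on slices.
-- outside the precondition, e.g. on solution('ba)('): A returns '(())(', B returns '(())('
import Mathlib
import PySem

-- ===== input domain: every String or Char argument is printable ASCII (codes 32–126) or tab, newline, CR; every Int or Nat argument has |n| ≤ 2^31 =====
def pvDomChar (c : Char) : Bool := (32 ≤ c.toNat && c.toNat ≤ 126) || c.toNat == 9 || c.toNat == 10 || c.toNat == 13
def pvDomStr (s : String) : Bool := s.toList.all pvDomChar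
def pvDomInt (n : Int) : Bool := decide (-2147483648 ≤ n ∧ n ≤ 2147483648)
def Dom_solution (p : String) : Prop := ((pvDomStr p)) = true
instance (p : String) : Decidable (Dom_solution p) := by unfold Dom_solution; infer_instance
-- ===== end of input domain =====

-- B replaces A's quadratic split search (check_bal on every slice p[:i], p[i:]) by ONE
-- running-counter pass per recursion level; objective: faster (asymptotic per level).

-- ===== PORT A =====
-- check_bal: count ')' and '(' in one loop, compare
def checkBalGo : List Char → Int → Int → Int × Int
  | [], r, l => (r, l)
  | c :: rest, r, l =>
    if c = ')' then checkBalGo rest (r + 1) l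
    else if c = '(' then checkBalGo rest r (l + 1)
    else checkBalGo rest r l

def checkBal (s : List Char) : Bool :=
  let rl := checkBalGo s 0 0
  if rl.1 ≠ rl.2 then false else true

-- check_per: running count with early False
def checkPer : List Char → Int → Bool
  | [], _ => true
  | c :: rest, count =>
    if c = '(' then checkPer rest (count + 1)
    else if count = 0 then false
    else checkPer rest (count - 1)

-- the 'for i in range(len(p)+1): if … : u=…; w=…; break' search
def findSplit (p : List Char) (i : Nat) : Option Nat :=
  if i ≤ p.length then
    if checkBal (p.take i) && (p.take i).length != 0 && checkBal (p.drop i) then some i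
    else findSplit p (i + 1)
  else none
termination_by p.length + 1 - i
decreasing_by omega

-- the recursion of A's solution; fuel makes the (terminating) Python recursion a total
-- Lean function.  When the split loop finds nothing, Python raises NameError (w unbound);
-- the port returns [] there — such inputs are outside Pre_solution.
def goA : Nat → List Char → List Char
  | 0, _ => []
  | f + 1, p =>
    if checkPer p 0 then p
    else
      match findSplit p 0 with
      | none => []
      | some i =>
        let u := p.take i
        let w := p.drop i
        if checkPer u 0 then u ++ goA f w
        else
          goA f ('(' :: (w ++ ')' :: (u.tail.dropLast).map (fun c => if c = '(' then ')' else '(')))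

def solution (p : String) : String := String.mk (goA (p.toList.length + 2) p.toList)

-- ===== PORT B =====
-- one pass: running balance + dip flag (check_per), running paren counts against the
-- totals (the split search), dip flag frozen at the split (check_per of u)
def scanB (tl tr : Int) : List Char → Int → Bool → Int → Int → Nat → Bool → Nat → Bool × Nat × Bool
  | [], _, dip, _, _, split, udip, _ => (dip, split, udip)
  | c :: rest, bal, dip, pl, pr, split, udip, i =>
    let bal' := bal + (if c = '(' then 1 else -1)
    let dip' := dip || decide (bal' < 0)
    let pl' := if c = '(' then pl + 1 else pl
    let pr' := if c = '(' then pr else if c = ')' then pr + 1 else pr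
    if split = 0 ∧ pl' = pr' ∧ tl - pl' = tr - pr' then
      scanB tl tr rest bal' dip' pl' pr' (i + 1) dip' (i + 1)
    else
      scanB tl tr rest bal' dip' pl' pr' split udip (i + 1)

def goB : Nat → List Char → List Char
  | 0, _ => []
  | f + 1, p =>
    let tl : Int := p.count '('
    let tr : Int := p.count ')'
    let sdu := scanB tl tr p 0 false 0 0 0 false 0
    if !sdu.1 then p
    else
      let u := p.take sdu.2.1
      let w := p.drop sdu.2.1
      if !sdu.2.2 then u ++ goB f w
      else goB f ('(' :: (w ++ ')' :: (u.tail.dropLast).map (fun c => if c = '(' then ')' else '(')))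

def solution_alt (p : String) : String := String.mk (goB (p.toList.length + 2) p.toList)

-- ===== PRECONDITION & SPEC =====
-- The two ports are proved equal on EVERY input (the equivalence proof below does not use
-- Pre_); Pre_ only delimits where Python A terminates normally: on strings outside these
-- three classes A usually raises NameError (its split loop finds no i and leaves w unbound)
-- or recurses forever.  The classes: balanced parenthesis-only strings (the problem's
-- domain); strings with no parentheses at all; and strings check_per accepts outright
-- (no prefix has more non-opening characters than opening parentheses).  A also happens to return
-- on some further mixed strings; B returns the identical value there (see cites) — they
-- are excluded only because A's termination on them has no closed form.
def Pre_solution (p : String) : Prop :=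
  ((p.toList.all (fun c => c == '(' || c == ')')) = true
      ∧ p.toList.count '(' = p.toList.count ')')
  ∨ (p.toList.all (fun c => !(c == '(') && !(c == ')'))) = true
  ∨ (p.toList.inits.all (fun t => decide (t.length ≤ 2 * t.count '('))) = true

instance (p : String) : Decidable (Pre_solution p) := by unfold Pre_solution; infer_instance

def pvWitness_solution : String := ")()("

def Spec_solution (p : String) (out : String) : Prop := out = solution_alt p
instance (p : String) (out : String) : Decidable (Spec_solution p out) := by
  unfold Spec_solution; infer_instance

-- ===== CLAIM (what is proved, stated in full; the proofs are below) =====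
def Claim_equal_solution : Prop :=
  ∀ (p : String), Dom_solution p → Pre_solution p → Spec_solution p (solution p)

-- ===== LEMMAS AND PROOFS =====

-- running balance of a prefix: +1 for '(', -1 for anything else (check_per's convention)
def pv (c : Char) : Int := if c = '(' then 1 else -1

def pbal : List Char → Int
  | [] => 0
  | c :: r => pv c + pbal r

theorem pbal_cons (c : Char) (t : List Char) : pbal (c :: t) = pv c + pbal t := rfl

theorem pv_eq_one {x : Char} (h : x = '(') : pv x = 1 := by simp [pv, h]

theorem pv_eq_neg {x : Char} (h : x ≠ '(') : pv x = -1 := by simp [pv, h]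

-- parenthesis counts of a list, as integers
def cntL (l : List Char) : Int := (l.count '(' : Int)
def cntR (l : List Char) : Int := (l.count ')' : Int)

theorem cntL_cons (c : Char) (r : List Char) :
    cntL (c :: r) = cntL r + (if c = '(' then 1 else 0) := by
  by_cases h : c = '(' <;> simp [cntL, List.count_cons, h] <;> push_cast <;> ring

theorem cntR_cons (c : Char) (r : List Char) :
    cntR (c :: r) = cntR r + (if c = ')' then 1 else 0) := by
  by_cases h : c = ')' <;> simp [cntR, List.count_cons, h] <;> push_cast <;> ring

theorem cntL_append (a b : List Char) : cntL (a ++ b) = cntL a + cntL b := by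
  simp [cntL, List.count_append]

theorem cntR_append (a b : List Char) : cntR (a ++ b) = cntR a + cntR b := by
  simp [cntR, List.count_append]

theorem cntL_one (c : Char) : cntL [c] = (if c = '(' then 1 else 0) := by
  by_cases h : c = '(' <;> simp [cntL, List.count_cons, h]

theorem cntR_one (c : Char) : cntR [c] = (if c = ')' then 1 else 0) := by
  by_cases h : c = ')' <;> simp [cntR, List.count_cons, h]

theorem checkBalGo_eq (l : List Char) (r q : Int) :
    checkBalGo l r q = (r + l.count ')', q + l.count '(') := by
  induction l generalizing r q with
  | nil => simp [checkBalGo]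
  | cons c rest ih =>
    by_cases h1 : c = ')'
    · simp [checkBalGo, h1, ih, List.count_cons]; push_cast; ring
    · by_cases h2 : c = '('
      · simp [checkBalGo, h1, h2, ih, List.count_cons]; push_cast; ring
      · simp [checkBalGo, h1, h2, ih, List.count_cons, Ne.symm h1, Ne.symm h2]

theorem checkBal_iff (l : List Char) : checkBal l = true ↔ cntR l = cntL l := by
  simp only [checkBal, checkBalGo_eq, cntL, cntR]
  constructor
  · intro hb
    split at hb
    · exact absurd hb (by simp)
    · omega
  · intro hb
    split
    · omega
    · rfl

theorem checkPer_iff (l : List Char) (c : Int) (hc : 0 ≤ c) :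
    checkPer l c = true ↔ ∀ k ≤ l.length, 0 ≤ c + pbal (l.take k) := by
  induction l generalizing c with
  | nil => simp [checkPer, pbal]; omega
  | cons x r ih =>
    by_cases hx : x = '('
    · rw [checkPer, if_pos hx, ih (c + 1) (by omega)]
      constructor
      · intro h k hk
        match k with
        | 0 => simpa [pbal] using hc
        | k + 1 =>
          have := h k (by simpa using hk)
          rw [List.take_succ_cons, pbal_cons, pv_eq_one hx]
          omega
      · intro h k hk
        have := h (k + 1) (by simpa using hk)
        rw [List.take_succ_cons, pbal_cons, pv_eq_one hx] at this
        omega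
    · rw [checkPer, if_neg hx]
      by_cases h0 : c = 0
      · rw [if_pos h0]
        constructor
        · intro h; exact absurd h (by simp)
        · intro h
          have := h 1 (by simp)
          have h1 : (x :: r).take 1 = [x] := rfl
          rw [h1, pbal_cons, pv_eq_neg hx] at this
          simp only [pbal] at this
          omega
      · rw [if_neg h0, ih (c - 1) (by omega)]
        constructor
        · intro h k hk
          match k with
          | 0 => simpa [pbal] using hc
          | k + 1 =>
            have := h k (by simpa using hk)
            rw [List.take_succ_cons, pbal_cons, pv_eq_neg hx]
            omega
        · intro h k hk
          have := h (k + 1) (by simpa using hk)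
          rw [List.take_succ_cons, pbal_cons, pv_eq_neg hx] at this
          omega

-- shifting a dip condition across one consumed character
theorem dip_shift (c : Char) (r : List Char) (bal : Int) (dip : Bool) :
    (((dip || decide (bal + pv c < 0)) = true ∨
        ∃ k, 0 < k ∧ k ≤ r.length ∧ (bal + pv c) + pbal (r.take k) < 0) ↔
      (dip = true ∨ ∃ k, 0 < k ∧ k ≤ (c :: r).length ∧ bal + pbal ((c :: r).take k) < 0)) := by
  constructor
  · rintro (h | ⟨k, hk0, hkl, hkb⟩)
    · rcases Bool.or_eq_true_iff.mp h with h | h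
      · exact Or.inl h
      · refine Or.inr ⟨1, by omega, by simp, ?_⟩
        have h1 : (c :: r).take 1 = [c] := rfl
        rw [h1, pbal_cons]
        have := of_decide_eq_true h
        simp only [pbal]
        omega
    · refine Or.inr ⟨k + 1, by omega, by simpa using hkl, ?_⟩
      rw [List.take_succ_cons, pbal_cons]
      omega
  · rintro (h | ⟨k, hk0, hkl, hkb⟩)
    · exact Or.inl (by simp [h])
    · match k with
      | 1 =>
        have h1 : (c :: r).take 1 = [c] := rfl
        rw [h1, pbal_cons] at hkb
        refine Or.inl (Bool.or_eq_true_iff.mpr (Or.inr ?_))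
        simp only [pbal] at hkb
        exact decide_eq_true (by omega)
      | k + 2 =>
        refine Or.inr ⟨k + 1, by omega, by simpa using hkl, ?_⟩
        rw [List.take_succ_cons, pbal_cons] at hkb
        omega

-- the same shift for the bounded dip condition
theorem dip_shift_bounded (c : Char) (r : List Char) (bal : Int) (dip : Bool) (k : Nat) :
    ((dip || decide (bal + pv c < 0)) = true ∨
        (∃ j, 0 < j ∧ j ≤ k ∧ (bal + pv c) + pbal (r.take j) < 0)) ↔
      (dip = true ∨ ∃ j, 0 < j ∧ j ≤ k + 1 ∧ bal + pbal ((c :: r).take j) < 0) := by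
  constructor
  · rintro (h | ⟨j, hj0, hjk, hjb⟩)
    · rcases Bool.or_eq_true_iff.mp h with h | h
      · exact Or.inl h
      · refine Or.inr ⟨1, by omega, by omega, ?_⟩
        have h1 : (c :: r).take 1 = [c] := rfl
        rw [h1, pbal_cons]
        have := of_decide_eq_true h
        simp only [pbal]
        omega
    · refine Or.inr ⟨j + 1, by omega, by omega, ?_⟩
      rw [List.take_succ_cons, pbal_cons]
      omega
  · rintro (h | ⟨j, hj0, hjk, hjb⟩)
    · exact Or.inl (by simp [h])
    · match j with
      | 1 =>
        have h1 : (c :: r).take 1 = [c] := rfl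
        rw [h1, pbal_cons] at hjb
        refine Or.inl (Bool.or_eq_true_iff.mpr (Or.inr ?_))
        simp only [pbal] at hjb
        exact decide_eq_true (by omega)
      | j + 2 =>
        rw [List.take_succ_cons, pbal_cons] at hjb
        exact Or.inr ⟨j + 1, by omega, by omega, by omega⟩

-- normal forms of the two counter updates in scanB
theorem plStep_eq (c : Char) (pl : Int) :
    (if c = '(' then pl + 1 else pl) = pl + (if c = '(' then 1 else 0) := by
  by_cases h : c = '(' <;> simp [h]

theorem prStep_eq (c : Char) (pr : Int) :
    (if c = '(' then pr else if c = ')' then pr + 1 else pr) =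
      pr + (if c = ')' then 1 else 0) := by
  by_cases h1 : c = '('
  · have h2 : ¬ c = ')' := by rw [h1]; decide
    simp [h1, h2]
  · by_cases h2 : c = ')' <;> simp [h1, h2]

-- spec of B's split search: first prefix length with both sides count-balanced,
-- paired with the dip flag at that point
def firstHitD (tl tr : Int) : List Char → Int → Bool → Int → Int → Option (Nat × Bool)
  | [], _, _, _, _ => none
  | c :: r, bal, dip, pl, pr =>
    let bal' := bal + pv c
    let dip' := dip || decide (bal' < 0)
    let pl' := pl + (if c = '(' then 1 else 0)
    let pr' := pr + (if c = ')' then 1 else 0)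
    if pl' = pr' ∧ tl - pl' = tr - pr' then some (1, dip')
    else (firstHitD tl tr r bal' dip' pl' pr').map (fun x => (x.1 + 1, x.2))

theorem scan_dip (tl tr : Int) (l : List Char) (bal : Int) (dip : Bool) (pl pr : Int)
    (split : Nat) (udip : Bool) (i : Nat) :
    (scanB tl tr l bal dip pl pr split udip i).1 = true ↔
      (dip = true ∨ ∃ k, 0 < k ∧ k ≤ l.length ∧ bal + pbal (l.take k) < 0) := by
  induction l generalizing bal dip pl pr split udip i with
  | nil => simp [scanB]
  | cons c r ih =>
    simp only [scanB]
    have hb : bal + (if c = '(' then 1 else -1) = bal + pv c := rfl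
    rw [hb, plStep_eq, prStep_eq]
    by_cases hhit : split = 0 ∧ pl + (if c = '(' then 1 else 0) = pr + (if c = ')' then 1 else 0) ∧
        tl - (pl + (if c = '(' then 1 else 0)) = tr - (pr + (if c = ')' then 1 else 0))
    · rw [if_pos hhit, ih]
      exact dip_shift c r bal dip
    · rw [if_neg hhit, ih]
      exact dip_shift c r bal dip

theorem scan_pair (tl tr : Int) (l : List Char) (bal : Int) (dip : Bool) (pl pr : Int)
    (split : Nat) (udip : Bool) (i : Nat) :
    (scanB tl tr l bal dip pl pr split udip i).2 =
      if split = 0 then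
        ((firstHitD tl tr l bal dip pl pr).map (fun x => (i + x.1, x.2))).getD (0, udip)
      else (split, udip) := by
  induction l generalizing bal dip pl pr split udip i with
  | nil => simp [scanB, firstHitD]
  | cons c r ih =>
    simp only [scanB, firstHitD]
    have hb : bal + (if c = '(' then 1 else -1) = bal + pv c := rfl
    rw [hb, plStep_eq, prStep_eq]
    by_cases hsp : split = 0
    · by_cases hhit : pl + (if c = '(' then 1 else 0) = pr + (if c = ')' then 1 else 0) ∧
          tl - (pl + (if c = '(' then 1 else 0)) = tr - (pr + (if c = ')' then 1 else 0))
      · rw [if_pos ⟨hsp, hhit.1, hhit.2⟩, ih, if_neg (by omega), if_pos hsp, if_pos hhit]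
        simp
      · rw [if_neg (by rintro ⟨_, h1, h2⟩; exact hhit ⟨h1, h2⟩), ih, if_pos hsp, if_pos hsp,
          if_neg hhit]
        cases hfh : firstHitD tl tr r (bal + pv c) (dip || decide (bal + pv c < 0))
            (pl + (if c = '(' then 1 else 0)) (pr + (if c = ')' then 1 else 0)) with
        | none => simp [hfh]
        | some x => simp [hfh]; omega
    · rw [if_neg (by rintro ⟨h, _⟩; exact hsp h), ih, if_neg hsp, if_neg hsp]

-- the condition firstHitD searches for, over prefixes of the remaining list
def Qc (tl tr pl pr : Int) (l : List Char) (m : Nat) : Prop :=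
  pl + cntL (l.take m) = pr + cntR (l.take m) ∧
    tl - (pl + cntL (l.take m)) = tr - (pr + cntR (l.take m))

theorem firstHitD_some (tl tr : Int) (l : List Char) (bal : Int) (dip : Bool) (pl pr : Int)
    (k : Nat) (d : Bool) (h : firstHitD tl tr l bal dip pl pr = some (k, d)) :
    0 < k ∧ k ≤ l.length ∧ Qc tl tr pl pr l k ∧
      (∀ m, 0 < m → m < k → ¬ Qc tl tr pl pr l m) ∧
      (d = true ↔ (dip = true ∨ ∃ j, 0 < j ∧ j ≤ k ∧ bal + pbal (l.take j) < 0)) := by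
  induction l generalizing bal dip pl pr k d with
  | nil => simp [firstHitD] at h
  | cons c r ih =>
    simp only [firstHitD] at h
    have ht1 : (c :: r).take 1 = [c] := rfl
    by_cases hhit : pl + (if c = '(' then 1 else 0) = pr + (if c = ')' then 1 else 0) ∧
        tl - (pl + (if c = '(' then 1 else 0)) = tr - (pr + (if c = ')' then 1 else 0))
    · rw [if_pos hhit, Option.some_inj, Prod.mk.injEq] at h
      obtain ⟨h1, h2⟩ := h
      subst h1
      subst h2
      refine ⟨by omega, by simp, ?_, by omega, ?_⟩
      · unfold Qc
        rw [ht1, cntL_one, cntR_one]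
        exact ⟨hhit.1, hhit.2⟩
      · rw [← dip_shift_bounded c r bal dip 0]
        constructor
        · intro hd
          exact Or.inl hd
        · rintro (hd | ⟨j, hj0, hjk, _⟩)
          · exact hd
          · omega
    · rw [if_neg hhit, Option.map_eq_some_iff] at h
      obtain ⟨⟨k', d'⟩, hk', hx⟩ := h
      rw [Prod.mk.injEq] at hx
      obtain ⟨hx1, hx2⟩ := hx
      subst hx1
      subst hx2
      obtain ⟨h1, h2, h3, h4, h5⟩ := ih _ _ _ _ _ _ hk'
      have hQshift : ∀ m : Nat, Qc tl tr pl pr (c :: r) (m + 1) ↔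
          Qc tl tr (pl + (if c = '(' then 1 else 0)) (pr + (if c = ')' then 1 else 0)) r m := by
        intro m
        unfold Qc
        rw [List.take_succ_cons, cntL_cons, cntR_cons]
        constructor
        · rintro ⟨a, b⟩; exact ⟨by omega, by omega⟩
        · rintro ⟨a, b⟩; exact ⟨by omega, by omega⟩
      refine ⟨by omega, by simpa using h2, (hQshift k').mpr h3, ?_, ?_⟩
      · intro m hm0 hmk
        match m with
        | 1 =>
          intro hq
          apply hhit
          obtain ⟨ha, hb⟩ := hq
          rw [ht1, cntL_one, cntR_one] at ha hb
          exact ⟨ha, hb⟩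
        | m + 2 =>
          rw [hQshift (m + 1)]
          exact h4 (m + 1) (by omega) (by omega)
      · rw [← dip_shift_bounded c r bal dip k']
        rw [h5]

theorem firstHitD_none (tl tr : Int) (l : List Char) (bal : Int) (dip : Bool) (pl pr : Int)
    (h : firstHitD tl tr l bal dip pl pr = none) :
    ∀ m, 0 < m → m ≤ l.length → ¬ Qc tl tr pl pr l m := by
  induction l generalizing bal dip pl pr with
  | nil => intro m hm0 hml; simp at hml; omega
  | cons c r ih =>
    simp only [firstHitD] at h
    have ht1 : (c :: r).take 1 = [c] := rfl
    by_cases hhit : pl + (if c = '(' then 1 else 0) = pr + (if c = ')' then 1 else 0) ∧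
        tl - (pl + (if c = '(' then 1 else 0)) = tr - (pr + (if c = ')' then 1 else 0))
    · rw [if_pos hhit] at h; exact absurd h (by simp)
    · rw [if_neg hhit, Option.map_eq_none_iff] at h
      intro m hm0 hml
      match m with
      | 1 =>
        intro hq
        apply hhit
        obtain ⟨ha, hb⟩ := hq
        rw [ht1, cntL_one, cntR_one] at ha hb
        exact ⟨ha, hb⟩
      | m + 2 =>
        have hsh : Qc tl tr pl pr (c :: r) (m + 2) ↔
            Qc tl tr (pl + (if c = '(' then 1 else 0)) (pr + (if c = ')' then 1 else 0)) r (m + 1) := by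
          unfold Qc
          rw [List.take_succ_cons, cntL_cons, cntR_cons]
          constructor
          · rintro ⟨a, b⟩; exact ⟨by omega, by omega⟩
          · rintro ⟨a, b⟩; exact ⟨by omega, by omega⟩
        rw [hsh]
        exact ih _ _ _ _ h (m + 1) (by omega) (by simpa using hml)

-- characterization of A's split search
theorem findSplit_some (p : List Char) (i k : Nat) (h : findSplit p i = some k) :
    i ≤ k ∧ k ≤ p.length ∧
      (checkBal (p.take k) && (p.take k).length != 0 && checkBal (p.drop k)) = true ∧
      ∀ m, i ≤ m → m < k →
        (checkBal (p.take m) && (p.take m).length != 0 && checkBal (p.drop m)) = false := by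
  induction hd : p.length + 1 - i generalizing i with
  | zero =>
    rw [findSplit, if_neg (by omega)] at h
    exact absurd h (by simp)
  | succ n ih =>
    rw [findSplit] at h
    by_cases hil : i ≤ p.length
    · rw [if_pos hil] at h
      by_cases hc : (checkBal (p.take i) && (p.take i).length != 0 && checkBal (p.drop i)) = true
      · rw [if_pos hc, Option.some_inj] at h
        subst h
        exact ⟨le_refl _, hil, hc, by omega⟩
      · rw [if_neg hc] at h
        obtain ⟨h1, h2, h3, h4⟩ := ih (i + 1) h (by omega)
        refine ⟨by omega, h2, h3, ?_⟩
        intro m hm1 hm2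
        rcases Nat.eq_or_lt_of_le hm1 with rfl | hlt
        · exact Bool.eq_false_iff.mpr hc
        · exact h4 m hlt hm2
    · rw [if_neg hil] at h
      exact absurd h (by simp)

theorem findSplit_none (p : List Char) (i : Nat) (h : findSplit p i = none) :
    ∀ m, i ≤ m → m ≤ p.length →
      (checkBal (p.take m) && (p.take m).length != 0 && checkBal (p.drop m)) = false := by
  induction hd : p.length + 1 - i generalizing i with
  | zero => intro m hm1 hm2; omega
  | succ n ih =>
    rw [findSplit] at h
    by_cases hil : i ≤ p.length
    · rw [if_pos hil] at h
      by_cases hc : (checkBal (p.take i) && (p.take i).length != 0 && checkBal (p.drop i)) = true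
      · rw [if_pos hc] at h; exact absurd h (by simp)
      · rw [if_neg hc] at h
        intro m hm1 hm2
        rcases Nat.eq_or_lt_of_le hm1 with rfl | hlt
        · exact Bool.eq_false_iff.mpr hc
        · exact ih (i + 1) h (by omega) m hlt hm2
    · intro m hm1 hm2; omega

-- A's split condition at k equals B's counting condition at k
theorem condA_iff (p : List Char) (k : Nat) (hk : k ≤ p.length) :
    (checkBal (p.take k) && (p.take k).length != 0 && checkBal (p.drop k)) = true ↔
      (k ≠ 0 ∧ Qc (cntL p) (cntR p) 0 0 p k) := by
  have hsum : cntL (p.take k) + cntL (p.drop k) = cntL p := by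
    rw [← cntL_append, List.take_append_drop]
  have hsumr : cntR (p.take k) + cntR (p.drop k) = cntR p := by
    rw [← cntR_append, List.take_append_drop]
  simp only [Bool.and_eq_true, bne_iff_ne, ne_eq, checkBal_iff, List.length_take, Qc]
  constructor
  · rintro ⟨⟨h1, h2⟩, h3⟩
    exact ⟨by omega, by omega, by omega⟩
  · rintro ⟨h0, h1, h2⟩
    exact ⟨⟨by omega, by omega⟩, by omega⟩

-- when the split search finds nothing, B recurses on p itself and burns down to []
theorem goB_stuck (g : Nat) (p : List Char)
    (h1 : (scanB (p.count '(' : Int) (p.count ')' : Int) p 0 false 0 0 0 false 0).1 = true)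
    (h2 : (scanB (p.count '(' : Int) (p.count ')' : Int) p 0 false 0 0 0 false 0).2 = (0, false)) :
    goB g p = [] := by
  induction g with
  | zero => rfl
  | succ g ih =>
    rw [goB]
    simp only [h1, h2, Bool.not_true, Bool.false_eq_true, if_false, Bool.not_false, if_true,
      List.take_zero, List.drop_zero, List.nil_append]
    exact ih

-- the main fuel-indexed equality: the two ports agree for every fuel and every input
theorem goA_eq_goB (f : Nat) : ∀ p : List Char, goA f p = goB f p := by
  induction f with
  | zero => intro p; rfl
  | succ f ih =>
    intro p
    rw [goA, goB]
    have hdip := scan_dip (p.count '(' : Int) (p.count ')' : Int) p 0 false 0 0 0 false 0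
    have hper := checkPer_iff p 0 (le_refl 0)
    have hpair := scan_pair (p.count '(' : Int) (p.count ')' : Int) p 0 false 0 0 0 false 0
    rw [if_pos rfl] at hpair
    by_cases hcp : checkPer p 0 = true
    · have hnod : (scanB (p.count '(' : Int) (p.count ')' : Int) p 0 false 0 0 0 false 0).1 = false := by
        rw [Bool.eq_false_iff]
        intro h
        rcases hdip.mp h with h' | ⟨k, hk0, hkl, hkb⟩
        · simp at h'
        · have := hper.mp hcp k hkl; omega
      simp [hcp, hnod]
    · have hdipt : (scanB (p.count '(' : Int) (p.count ')' : Int) p 0 false 0 0 0 false 0).1 = true := by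
        rw [hdip]
        right
        by_contra hno
        push_neg at hno
        refine hcp (hper.mpr (fun k hk => ?_))
        rcases Nat.eq_zero_or_pos k with rfl | hk0
        · simp [pbal]
        · have := hno k hk0 hk
          omega
      cases hfs : findSplit p 0 with
      | none =>
        -- A raises in Python (port returns []); B recurses on p forever (port burns fuel to [])
        have hnone : firstHitD (p.count '(' : Int) (p.count ')' : Int) p 0 false 0 0 = none := by
          cases hfh : firstHitD (p.count '(' : Int) (p.count ')' : Int) p 0 false 0 0 with
          | none => rfl
          | some x =>
            exfalso
            obtain ⟨hk0, hkl, hq, _, _⟩ :=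
              firstHitD_some _ _ _ _ _ _ _ x.1 x.2 (by rw [hfh])
            have hcond := (condA_iff p x.1 hkl).mpr ⟨by omega, by simpa [cntL, cntR] using hq⟩
            rw [findSplit_none p 0 hfs x.1 (by omega) hkl] at hcond
            exact absurd hcond (by simp)
        rw [hnone] at hpair
        simp only [Option.map_none, Option.getD_none] at hpair
        simp only [hcp, if_false, hdipt, Bool.not_true, Bool.false_eq_true, if_false, hpair,
          Bool.not_false, if_true, List.take_zero, List.drop_zero, List.nil_append]
        exact (goB_stuck f p hdipt hpair).symm
      | some k =>
        obtain ⟨_, hkl, hcond, hmin⟩ := findSplit_some p 0 k hfs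
        obtain ⟨hk0, hq⟩ := (condA_iff p k hkl).mp hcond
        -- B's search finds the same split
        obtain ⟨d, hfh⟩ : ∃ d, firstHitD (p.count '(' : Int) (p.count ')' : Int) p 0 false 0 0 =
            some (k, d) := by
          cases hfh : firstHitD (p.count '(' : Int) (p.count ')' : Int) p 0 false 0 0 with
          | none =>
            exfalso
            exact firstHitD_none _ _ _ _ _ _ _ hfh k (by omega) hkl
              (by simpa [cntL, cntR] using hq)
          | some x =>
            obtain ⟨x1, x2⟩ := x
            obtain ⟨hx0, hxl, hxq, hxmin, _⟩ := firstHitD_some _ _ _ _ _ _ _ x1 x2 hfh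
            have hxk : x1 = k := by
              rcases Nat.lt_trichotomy x1 k with hlt | heq | hgt
              · exfalso
                have := hmin x1 (by omega) hlt
                rw [(condA_iff p x1 hxl).mpr ⟨by omega, by simpa [cntL, cntR] using hxq⟩] at this
                exact absurd this (by simp)
              · exact heq
              · exfalso
                exact hxmin k (by omega) hgt (by simpa [cntL, cntR] using hq)
            subst hxk
            exact ⟨x2, rfl⟩
        obtain ⟨_, _, _, _, hd⟩ := firstHitD_some _ _ _ _ _ _ _ k d hfh
        rw [hfh] at hpair
        simp only [Option.map_some, Option.getD_some] at hpair
        -- the two u-correctness tests agree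
        have hbranch : checkPer (p.take k) 0 = !d := by
          by_cases hex : ∃ j, 0 < j ∧ j ≤ k ∧ (0 : Int) + pbal (p.take j) < 0
          · have hdt : d = true := hd.mpr (Or.inr hex)
            rw [hdt, Bool.not_true, Bool.eq_false_iff]
            intro hcpu
            obtain ⟨j, hj0, hjk, hjb⟩ := hex
            have := (checkPer_iff (p.take k) 0 (le_refl 0)).mp hcpu j
              (by rw [List.length_take]; omega)
            rw [List.take_take, show min j k = j by omega] at this
            omega
          · have hdf : d = false := by
              rcases Bool.eq_false_or_eq_true d with hdd | hdd
              · rcases hd.mp hdd with h' | h'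
                · exact absurd h' (by simp)
                · exact absurd h' hex
              · exact hdd
            rw [hdf, Bool.not_false]
            rw [checkPer_iff _ 0 (le_refl 0)]
            intro m hm
            rw [List.length_take] at hm
            rw [List.take_take, show min m k = m by omega]
            rcases Nat.eq_zero_or_pos m with rfl | hm0
            · simp [pbal]
            · by_contra hneg
              exact hex ⟨m, hm0, by omega, by omega⟩
        simp only [hcp, if_false, hdipt, Bool.not_true, Bool.false_eq_true, if_false, hpair]
        simp only [Nat.zero_add]
        by_cases hdd : d = true
        · rw [hdd] at hbranch
          simp only [hdd, Bool.not_true, Bool.false_eq_true, if_false]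
          rw [if_neg (by simp [hbranch])]
          exact ih _
        · have hdf : d = false := by simpa using hdd
          rw [hdf] at hbranch
          simp only [hdf, Bool.not_false, if_true]
          rw [if_pos (by simp [hbranch]), ih (p.drop k)]

-- ===== VERDICT (by name: the statement is the Claim_ definition above) =====
theorem solution_spec : Claim_equal_solution := by
  intro p _ _
  unfold Spec_solution solution solution_alt
  congr 1
  exact goA_eq_goB _ _
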